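-- pv_equiv track=rewrite | github.com/zenniskayy2k4/CTF-Archive | PascalCTF/wordy/service.py | index_to_word
-- ===== SOURCE A (Python) =====
-- ALPHABET = "abcdefghijklmnop"  # 16 letters
--
-- K = len(ALPHABET)
--
-- L = 5
--
-- N = K ** L
--
-- def index_to_word(idx: int) -> str:
--     if not (0 <= idx < N):
--         raise ValueError("index out of range")
--     digits = []
--     x = idx
--     for _ in range(L):
--         digits.append(x % K)
--         x //= K
--     letters = [ALPHABET[d] for d in reversed(digits)]
--     return "".join(letters)
-- ===== SOURCE B (Python) =====
-- ALPHABET = "abcdefghijklmnop"  # 16 letters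
--
-- _TR = str.maketrans("0123456789abcdef", ALPHABET)
--
-- def index_to_word(idx: int) -> str:
--     if not (0 <= idx < 16 ** 5):
--         raise ValueError("index out of range")
--     return format(idx, "05x").translate(_TR)
-- ===== Notes on version B (the rewrite author's own statement) =====
-- stated objective: idiomatic
-- what changed: Replaces the manual mod/floordiv digit-extraction loop, list reversal and per-digit alphabet indexing with the built-in fixed-width hex conversion format(idx,'05x') plus a one-time str.maketrans/translate character map.
import Mathlib
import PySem

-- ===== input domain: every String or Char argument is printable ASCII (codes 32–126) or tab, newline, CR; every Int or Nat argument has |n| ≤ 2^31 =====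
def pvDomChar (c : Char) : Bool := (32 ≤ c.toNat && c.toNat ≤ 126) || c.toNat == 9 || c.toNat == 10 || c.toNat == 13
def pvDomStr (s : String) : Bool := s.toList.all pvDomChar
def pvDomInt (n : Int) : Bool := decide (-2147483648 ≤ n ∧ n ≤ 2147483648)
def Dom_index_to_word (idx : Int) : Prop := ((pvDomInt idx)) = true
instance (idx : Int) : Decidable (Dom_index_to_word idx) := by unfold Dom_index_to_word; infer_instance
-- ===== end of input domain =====

-- B replaces the manual mod/floordiv digit loop by built-in fixed-width hex formatting
-- plus a translation table (idiomatic, same cost).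


-- ===== PORT A =====
def pvAlphabet : List Char :=
  ['a','b','c','d','e','f','g','h','i','j','k','l','m','n','o','p']

-- the raising branch is excluded by Pre_; ALPHABET[d] has d = x % 16 ∈ [0,16) under Pre_,
-- so the pyGetD default is never used
def index_to_word (idx : Int) : String :=
  let st := (List.range 5).foldl
    (fun (st : List Int × Int) _ =>
      (st.1 ++ [PySem.Int.mod st.2 16], PySem.Int.floordiv st.2 16)) ([], idx)
  let letters := st.1.reverse.map (fun d => PySem.List.pyGetD pvAlphabet d 'a')
  String.mk letters

-- ===== PORT B =====
def pvHexDigits : List Char :=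
  ['0','1','2','3','4','5','6','7','8','9','a','b','c','d','e','f']

-- str.maketrans/translate: look the char up in the table, unmapped chars unchanged
def pvTr (c : Char) : Char := (((pvHexDigits.zip pvAlphabet).lookup c).getD c)

-- hex digits of n, most significant first (the digit part of format(n, 'x'))
def pvHexChars (n : Nat) : List Char :=
  if h : n = 0 then []
  else pvHexChars (n / 16) ++ [pvHexDigits.getD (n % 16) '0']
  decreasing_by exact Nat.div_lt_self (Nat.pos_of_ne_zero h) (by omega)

def index_to_word_alt (idx : Int) : String :=
  let s := if idx = 0 then ['0'] else pvHexChars idx.toNat  -- format(idx, 'x')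
  let padded := List.replicate (5 - s.length) '0' ++ s      -- '05' zero padding
  String.mk (padded.map pvTr)

-- ===== PRECONDITION & SPEC =====
-- Pre_: exactly the inputs on which A returns (A raises ValueError outside 0 ≤ idx < 16^5)
def Pre_index_to_word (idx : Int) : Prop := 0 ≤ idx ∧ idx < 1048576
instance (idx : Int) : Decidable (Pre_index_to_word idx) := by unfold Pre_index_to_word; infer_instance
def pvWitness_index_to_word : Int := (123456)

def Spec_index_to_word (idx : Int) (out : String) : Prop := out = index_to_word_alt idx
instance (idx : Int) (out : String) : Decidable (Spec_index_to_word idx out) := by unfold Spec_index_to_word; infer_instance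

-- ===== CLAIM (what is proved, stated in full; the proofs are below) =====
def Claim_equal_index_to_word : Prop := ∀ (idx : Int), Dom_index_to_word idx → Pre_index_to_word idx → Spec_index_to_word idx (index_to_word idx)

-- ===== LEMMAS AND PROOFS =====

-- common specification: the k least-significant base-16 digits of n, as letters, MSF
def pvF : Nat → Nat → List Char
  | 0, _ => []
  | k+1, n => pvF k (n / 16) ++ [pvAlphabet.getD (n % 16) 'a']

theorem pvA_eq (n : Nat) : index_to_word (n : Int) = String.mk (pvF 5 n) := by
  simp [index_to_word, pvF, List.range_succ]
  norm_cast
  simp only [PySem.List.pyGetD_natCast, List.getD_eq_getElem?_getD]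

theorem pvF_zero (k : Nat) : pvF k 0 = List.replicate k 'a' := by
  induction k with
  | zero => rfl
  | succ k ih => simp [pvF, Nat.zero_div, ih, List.replicate_succ']; decide

theorem pvTr_digit (d : Nat) (h : d < 16) :
    pvTr (pvHexDigits.getD d '0') = pvAlphabet.getD d 'a' := by
  interval_cases d <;> decide

theorem pvPad_eq (k : Nat) : ∀ n : Nat, n < 16 ^ k →
    (List.replicate (k - (pvHexChars n).length) '0' ++ pvHexChars n).map pvTr = pvF k n := by
  induction k with
  | zero =>
    intro n hn
    have : n = 0 := by omega
    subst this
    simp [pvHexChars, pvF]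
  | succ k ih =>
    intro n hn
    by_cases h0 : n = 0
    · subst h0
      rw [pvHexChars, dif_pos rfl]
      simp only [List.length_nil, Nat.sub_zero, List.append_nil, List.map_replicate]
      rw [show pvTr '0' = 'a' from by decide, pvF, pvF_zero,
        show pvAlphabet.getD (0 % 16) 'a' = 'a' from by decide, ← List.replicate_succ']
    · rw [pvHexChars, dif_neg h0]
      have hdiv : n / 16 < 16 ^ k := by
        rw [Nat.div_lt_iff_lt_mul (by omega)]
        calc n < 16 ^ (k+1) := hn
        _ = 16 ^ k * 16 := by ring
      rw [List.length_append, List.length_singleton,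
        Nat.succ_sub_succ, ← List.append_assoc, List.map_append,
        ih (n / 16) hdiv, List.map_singleton, pvTr_digit _ (Nat.mod_lt _ (by omega))]
      rfl

theorem pvB_eq (n : Nat) (h : n < 16 ^ 5) :
    index_to_word_alt (n : Int) = String.mk (pvF 5 n) := by
  by_cases h0 : n = 0
  · subst h0; decide
  · have : ((n : Int) = 0) = False := by simp [h0]
    simp only [index_to_word_alt, this, if_false, Int.toNat_natCast]
    rw [pvPad_eq 5 n h]

-- ===== VERDICT (by name: the statement is the Claim_ definition above) =====
theorem index_to_word_spec : Claim_equal_index_to_word := by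
  intro idx _ hpre
  unfold Spec_index_to_word
  obtain ⟨h0, h1⟩ := hpre
  obtain ⟨n, rfl⟩ := Int.eq_ofNat_of_zero_le h0
  rw [pvA_eq, pvB_eq n (by exact_mod_cast (by norm_num at h1 ⊢; omega : (n:Int) < 16 ^ 5))]
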